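-- pv_equiv track=rewrite | github.com/cnikbj/pythales | pythales/hsm.py | _get_digits_from_string
-- ===== SOURCE A (Python) =====
-- def _get_digits_from_string(cyphertext, length=4):
--     """
--     Extract PVV/CVV digits from the cyphertext (HEX-encoded string)
--     """
--     digits = ''
--
--     """
--     The algorigthm is used for PVV and CVV calculation.
--
--     1. The cyphertext is scanned from left to right. Decimal digits are
--     selected during the scan until the needed number of decimal digits is found.
--     Each selected digit is placed from left to right according to the order
--     of selection. If needed number of decimal digits is found (four in case of PVV,
--     three in case of CVV), those digits are the PVV or CVV.
--     """
--     for c in cyphertext: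
--         if len(digits) >= length:
--             break
--
--         try:
--             int(c)
--             digits += c
--         except ValueError:
--             continue
--
--     """
--     2. If, at the end of the first scan, less than four decimal digits
--     have been selected, a second scan is performed from left to right.
--     During the second scan, all decimal digits are skipped and only nondecimal
--     digits can be processed. Nondecimal digits are converted to decimal
--     digits by subtracting 10. The process proceeds until four digits of
--     PVV are found.
--     """
--     if len(digits) < length:
--         for c in cyphertext:
--             if len(digits) >= length:
--                 break
--
--             if (int(c, 16) - 10) >= 0:
--                 digits += str(int(c, 16) - 10)
--
--     return digits
-- ===== SOURCE B (Python) =====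
-- def _get_digits_from_string(cyphertext, length=4):
--     """One classifying pass splits characters into a decimal bucket and a
--     letter-value bucket; the answer is concatenate-and-slice of the buckets."""
--     dec, let = [], []
--     for c in cyphertext:
--         v = "0123456789abcdef".find(c.lower())
--         if 0 <= v <= 9:
--             dec.append(c)
--         elif v >= 10:
--             let.append(chr(ord('0') + v - 10))
--     n = max(length, 0)
--     if len(dec) >= n:
--         return ''.join(dec[:n])
--     return ''.join((dec + let)[:n])
-- ===== Notes on version B (the rewrite author's own statement) =====
-- stated objective: alternative
-- what changed: A's two staged break-guarded scans (try/except decimal scan, then a hex re-scan) are replaced by one classifying pass that buckets every character via a single hexdigit-index lookup into a decimal list and a letter-value list, with the answer produced afterwards by concatenate-and-slice of the buckets.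
import Mathlib
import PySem

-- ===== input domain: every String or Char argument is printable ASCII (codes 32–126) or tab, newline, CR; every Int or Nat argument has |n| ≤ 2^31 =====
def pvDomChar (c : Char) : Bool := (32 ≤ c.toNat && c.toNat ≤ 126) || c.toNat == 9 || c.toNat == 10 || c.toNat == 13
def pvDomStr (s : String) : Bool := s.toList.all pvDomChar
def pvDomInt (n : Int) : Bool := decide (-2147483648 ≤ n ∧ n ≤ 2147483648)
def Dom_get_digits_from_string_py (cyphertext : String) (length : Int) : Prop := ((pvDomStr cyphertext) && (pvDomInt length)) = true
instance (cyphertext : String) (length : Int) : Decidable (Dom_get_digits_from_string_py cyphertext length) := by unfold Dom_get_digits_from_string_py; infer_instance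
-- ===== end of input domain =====

-- B replaces A's two staged break-guarded scans by one classifying pass into two buckets
-- (decimal chars / letter values) followed by concatenate-and-slice (alternative; same cost).


-- ===== PORT A =====
-- literal port of A: first scan collects decimal digits (int(c) succeeds) until `length`
-- is reached; if still short, a second scan turns hex letters into digits by subtracting 10.
-- The second scan's int(c, 16) can raise ValueError: the fold carries an Option, none = raise
-- (excluded by Pre_; the "" returned there is junk outside the claim).
def get_digits_from_string_py (cyphertext : String) (length : Int) : String :=
  let digits1 : List Char := cyphertext.toList.foldl (fun s c =>
    if length ≤ (s.length : Int) then s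
    else match PySem.Int.ofChars? [c] with     -- int(c): succeeds / ValueError → continue
      | some _ => s ++ [c]
      | none => s) []
  let digits2 : Option (List Char) :=
    if (digits1.length : Int) < length then
      cyphertext.toList.foldl (fun os c =>
        match os with
        | none => none
        | some s =>
          if length ≤ (s.length : Int) then some s
          else match PySem.Int.ofCharsBase? [c] 16 with   -- int(c, 16); none = ValueError
            | none => none
            | some v => if 0 ≤ v - 10 then some (s ++ PySem.Int.toChars (v - 10)) else some s)
        (some digits1)
    else some digits1
  match digits2 with
  | some s => String.ofList s
  | none => ""          -- Python raises here; outside Pre_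

-- ===== PORT B =====
-- helper: v = "0123456789abcdef".find(c.lower())  (the classifying lookup of Source B)
def pvHexFind (c : Char) : Int :=
  PySem.Chars.find "0123456789abcdef".toList (PySem.Chars.lower [c])

-- literal port of Source B: ONE pass buckets each character — decimal chars into `dec`,
-- chr(ord('0') + v - 10) for letters into `let` — then n = max(length, 0) and the result is a
-- slice of a bucket concatenation ('' .join of one-char strings = the char list itself).
def get_digits_from_string_py_alt (cyphertext : String) (length : Int) : String :=
  let p : List Char × List Char := cyphertext.toList.foldl (fun p c =>
    let v : Int := pvHexFind c
    if 0 ≤ v ∧ v ≤ 9 then (p.1 ++ [c], p.2)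
    else if 10 ≤ v then (p.1, p.2 ++ [Char.ofNat ('0'.toNat + (v - 10).toNat)])
    else p) ([], [])
  let n : Int := max length 0
  if (n : Int) ≤ (p.1.length : Int) then
    String.ofList (PySem.List.slice p.1 none (some n))
  else
    String.ofList (PySem.List.slice (p.1 ++ p.2) none (some n))

-- ===== PRECONDITION & SPEC =====
-- Pre_ excludes exactly the inputs on which A raises ValueError: those where the decimal
-- digits fall short of `length` and the second scan meets a non-hex character before
-- `length` digits have been assembled.
def Pre_get_digits_from_string_py (cyphertext : String) (length : Int) : Prop :=
  length ≤ ((cyphertext.toList.filter (fun c => PySem.Chars.isdigit c)).length : Int) ∨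
  ∀ i, i < cyphertext.toList.length →
    (PySem.Chars.isdigit cyphertext.toList[i]! ||
      (PySem.Int.ofCharsBase? [cyphertext.toList[i]!] 16).isSome) = true ∨
    (PySem.Int.ofCharsBase? [cyphertext.toList[i]!] 16 = none ∧
      length ≤ (((cyphertext.toList.filter (fun c => PySem.Chars.isdigit c)).length : Int) +
        ((cyphertext.toList.take i).countP
          (fun c => !PySem.Chars.isdigit c && (PySem.Int.ofCharsBase? [c] 16).isSome) : Int)))
instance (cyphertext : String) (length : Int) : Decidable (Pre_get_digits_from_string_py cyphertext length) := by unfold Pre_get_digits_from_string_py; infer_instance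

def pvWitness_get_digits_from_string_py : String × Int := ("a1b2", 4)

def Spec_get_digits_from_string_py (cyphertext : String) (length : Int) (out : String) : Prop := out = get_digits_from_string_py_alt cyphertext length
instance (cyphertext : String) (length : Int) (out : String) : Decidable (Spec_get_digits_from_string_py cyphertext length out) := by unfold Spec_get_digits_from_string_py; infer_instance

-- ===== CLAIM (what is proved, stated in full; the proofs are below) =====
def Claim_equal_get_digits_from_string_py : Prop := ∀ (cyphertext : String) (length : Int), Dom_get_digits_from_string_py cyphertext length → Pre_get_digits_from_string_py cyphertext length → Spec_get_digits_from_string_py cyphertext length (get_digits_from_string_py cyphertext length)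

-- ===== LEMMAS AND PROOFS =====

-- proof-only abbreviations: the letter digit B emits for a char, and the chunk A appends
def pvLet (c : Char) : Option Char :=
  if 10 ≤ pvHexFind c then some (Char.ofNat ('0'.toNat + (pvHexFind c - 10).toNat)) else none

def pvChunk (c : Char) : List Char := (pvLet c).elim [] (fun d => [d])

-- A's phase-2 contribution of one char: none = ValueError, some l = the appended chars
def pvStepA (c : Char) : Option (List Char) :=
  (PySem.Int.ofCharsBase? [c] 16).map
    (fun v => if 0 ≤ v - 10 then PySem.Int.toChars (v - 10) else [])

-- per-character facts over the 127 printable/domain codes, by evaluation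
lemma pvCharLt127 (c : Char) (h : pvDomChar c = true) : c.toNat < 127 := by
  simp [pvDomChar] at h; omega

set_option maxRecDepth 8192 in
lemma pvCharDigitIff (c : Char) (h : pvDomChar c = true) :
    (PySem.Int.ofChars? [c]).isSome = PySem.Chars.isdigit c := by
  have key : ∀ n : Nat, n < 127 →
      (PySem.Int.ofChars? [Char.ofNat n]).isSome = PySem.Chars.isdigit (Char.ofNat n) := by decide
  have hk := key c.toNat (pvCharLt127 c h)
  rwa [Char.ofNat_toNat] at hk

set_option maxRecDepth 8192 in
lemma pvDec_eq (c : Char) (h : pvDomChar c = true) :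
    PySem.Chars.isdigit c = decide (0 ≤ pvHexFind c ∧ pvHexFind c ≤ 9) := by
  have key : ∀ n : Nat, n < 127 →
      PySem.Chars.isdigit (Char.ofNat n)
        = decide (0 ≤ pvHexFind (Char.ofNat n) ∧ pvHexFind (Char.ofNat n) ≤ 9) := by decide
  have hk := key c.toNat (pvCharLt127 c h)
  rwa [Char.ofNat_toNat] at hk

set_option maxRecDepth 8192 in
lemma pvStepA_eq (c : Char) (h : pvDomChar c = true) :
    pvStepA c = none ∨ pvStepA c = some (pvChunk c) := by
  have key : ∀ n : Nat, n < 127 →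
      pvStepA (Char.ofNat n) = none ∨ pvStepA (Char.ofNat n) = some (pvChunk (Char.ofNat n)) := by
    decide
  have hk := key c.toNat (pvCharLt127 c h)
  rwa [Char.ofNat_toNat] at hk

set_option maxRecDepth 8192 in
lemma pvLet_isSome (c : Char) (h : pvDomChar c = true) :
    (pvLet c).isSome = (!PySem.Chars.isdigit c && (PySem.Int.ofCharsBase? [c] 16).isSome) := by
  have key : ∀ n : Nat, n < 127 →
      (pvLet (Char.ofNat n)).isSome
        = (!PySem.Chars.isdigit (Char.ofNat n)
            && (PySem.Int.ofCharsBase? [Char.ofNat n] 16).isSome) := by decide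
  have hk := key c.toNat (pvCharLt127 c h)
  rwa [Char.ofNat_toNat] at hk

set_option maxRecDepth 8192 in
lemma pvDigit_hex (c : Char) (h : pvDomChar c = true) (hd : PySem.Chars.isdigit c = true) :
    (PySem.Int.ofCharsBase? [c] 16).isSome = true := by
  have key : ∀ n : Nat, n < 127 → PySem.Chars.isdigit (Char.ofNat n) = true →
      (PySem.Int.ofCharsBase? [Char.ofNat n] 16).isSome = true := by decide
  have hk := key c.toNat (pvCharLt127 c h)
  rw [Char.ofNat_toNat] at hk
  exact hk hd

lemma pvChunk_len (c : Char) : (pvChunk c).length ≤ 1 := by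
  unfold pvChunk pvLet
  by_cases h : 10 ≤ pvHexFind c <;> simp [h]

-- phase 1 of A: once the needed number of digits is reached, the scan keeps the state
lemma pvP1_id (length : Int) (cs : List Char) (s : List Char) (h : length ≤ (s.length : Int)) :
    cs.foldl (fun s c =>
      if length ≤ (s.length : Int) then s
      else match PySem.Int.ofChars? [c] with
        | some _ => s ++ [c]
        | none => s) s = s := by
  induction cs with
  | nil => rfl
  | cons c cs ih => simpa [if_pos h] using ih

-- phase 1 of A computes the decimal filter truncated to `length`
lemma pvP1_eq (length : Int) (cs : List Char) (hdom : ∀ c ∈ cs, pvDomChar c = true) :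
    ∀ s : List Char, (s.length : Int) ≤ length →
    cs.foldl (fun s c =>
      if length ≤ (s.length : Int) then s
      else match PySem.Int.ofChars? [c] with
        | some _ => s ++ [c]
        | none => s) s
    = s ++ (cs.filter (fun c => PySem.Chars.isdigit c)).take (length.toNat - s.length) := by
  induction cs with
  | nil => intro s _; simp
  | cons c cs ih =>
    intro s hs
    have hdc : pvDomChar c = true := hdom c (by simp)
    have hdcs : ∀ x ∈ cs, pvDomChar x = true := fun x hx => hdom x (by simp [hx])
    have hiso := pvCharDigitIff c hdc
    by_cases hg : length ≤ (s.length : Int)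
    · have hlen : length.toNat - s.length = 0 := by omega
      simp only [List.foldl_cons, if_pos hg, hlen, List.take_zero, List.append_nil]
      exact pvP1_id length cs s hg
    · simp only [List.foldl_cons, if_neg hg]
      cases hof : PySem.Int.ofChars? [c] with
      | some v =>
        have hd : PySem.Chars.isdigit c = true := by rw [← hiso, hof]; rfl
        have hlen1 : (s ++ [c]).length = s.length + 1 := by simp
        have hs' : (((s ++ [c]).length : Int)) ≤ length := by rw [hlen1]; push_cast; omega
        rw [ih hdcs (s ++ [c]) hs']
        have hn : length.toNat - s.length = (length.toNat - (s ++ [c]).length) + 1 := by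
          rw [hlen1]; omega
        simp only [List.filter_cons, hd, if_true, hn, List.take_succ_cons, List.append_assoc,
          List.cons_append, List.nil_append]
      | none =>
        have hd : PySem.Chars.isdigit c = false := by rw [← hiso, hof]; rfl
        rw [ih hdcs s hs]
        simp [hd]

-- A's phase-2 fold keeps a full accumulator unchanged
lemma pvP2A_id (length : Int) (cs : List Char) (s : List Char) (h : length ≤ (s.length : Int)) :
    cs.foldl (fun os c =>
      match os with
      | none => none
      | some s =>
        if length ≤ (s.length : Int) then some s
        else match PySem.Int.ofCharsBase? [c] 16 with
          | none => none
          | some v => if 0 ≤ v - 10 then some (s ++ PySem.Int.toChars (v - 10)) else some s)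
      (some s) = some s := by
  induction cs with
  | nil => rfl
  | cons c cs ih => simpa [if_pos h] using ih

-- A's phase-2 fold, on inputs that do not raise, appends the letter digits up to `length`
lemma pvP2_eq (length : Int) (cs : List Char) (hdom : ∀ c ∈ cs, pvDomChar c = true) :
    ∀ s : List Char, (s.length : Int) ≤ length →
    (∀ i, i < cs.length →
      (PySem.Int.ofCharsBase? [cs[i]!] 16).isSome = true ∨
      length ≤ (s.length : Int) + ((cs.take i).countP (fun c => (pvLet c).isSome) : Int)) →
    cs.foldl (fun os c =>
      match os with
      | none => none
      | some s =>
        if length ≤ (s.length : Int) then some s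
        else match PySem.Int.ofCharsBase? [c] 16 with
          | none => none
          | some v => if 0 ≤ v - 10 then some (s ++ PySem.Int.toChars (v - 10)) else some s)
      (some s)
    = some (s ++ (cs.filterMap pvLet).take (length.toNat - s.length)) := by
  induction cs with
  | nil => intro s _ _; simp
  | cons c cs ih =>
    intro s hs hpre
    have hdc : pvDomChar c = true := hdom c (by simp)
    have hdcs : ∀ x ∈ cs, pvDomChar x = true := fun x hx => hdom x (by simp [hx])
    by_cases hg : length ≤ (s.length : Int)
    · have hlen : length.toNat - s.length = 0 := by omega
      simp only [List.foldl_cons, if_pos hg, hlen, List.take_zero, List.append_nil]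
      exact pvP2A_id length cs s hg
    · -- the head must be hex-convertible: the count bound at i = 0 is impossible here
      have hhex : (PySem.Int.ofCharsBase? [c] 16).isSome = true := by
        rcases hpre 0 (by simp) with h | h
        · simpa using h
        · exfalso; simp at h; omega
      cases hof : PySem.Int.ofCharsBase? [c] 16 with
      | none => rw [hof] at hhex; simp at hhex
      | some v =>
        -- the chunk appended for c is pvChunk c (from the per-character evaluation lemma)
        have hstep : (if 0 ≤ v - 10 then PySem.Int.toChars (v - 10) else []) = pvChunk c := by
          rcases pvStepA_eq c hdc with h | h
          · unfold pvStepA at h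
            rw [hof] at h
            simp at h
          · unfold pvStepA at h
            rw [hof] at h
            simpa using h
        have hcount : (pvChunk c).length = ((pvLet c).isSome).toNat := by
          unfold pvChunk; cases pvLet c <;> simp
        have hs' : (((s ++ pvChunk c).length : Int)) ≤ length := by
          have := pvChunk_len c
          simp only [List.length_append]
          push_cast
          omega
        have hpre' : ∀ i, i < cs.length →
            (PySem.Int.ofCharsBase? [cs[i]!] 16).isSome = true ∨
            length ≤ ((s ++ pvChunk c).length : Int) +
              ((cs.take i).countP (fun c => (pvLet c).isSome) : Int) := by
          intro i hi
          rcases hpre (i + 1) (by simp; omega) with h | h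
          · left; simpa using h
          · right
            have htake : ((c :: cs).take (i + 1)).countP (fun c => (pvLet c).isSome)
                = ((pvLet c).isSome).toNat + (cs.take i).countP (fun c => (pvLet c).isSome) := by
              simp only [List.take_succ_cons, List.countP_cons]
              cases pvLet c with
              | none => simp
              | some d => simp; omega
            rw [htake] at h
            simp only [List.length_append, hcount]
            push_cast at h ⊢
            omega
        have hfm : (c :: cs).filterMap pvLet = pvChunk c ++ cs.filterMap pvLet := by
          unfold pvChunk; cases h : pvLet c <;> simp [h]
        by_cases hv : 0 ≤ v - 10
        · have hch : PySem.Int.toChars (v - 10) = pvChunk c := by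
            rw [← hstep, if_pos hv]
          simp only [List.foldl_cons, if_neg hg, hof, if_pos hv]
          rw [hch, ih hdcs (s ++ pvChunk c) hs' hpre', hfm]
          have hn1 : s.length < length.toNat := by omega
          have hcle : (pvChunk c).length ≤ length.toNat - s.length := by
            have := pvChunk_len c; omega
          rw [List.take_append, List.take_of_length_le hcle, List.append_assoc]
          have : length.toNat - s.length - (pvChunk c).length
              = length.toNat - (s ++ pvChunk c).length := by
            simp only [List.length_append]; omega
          rw [this]
        · have hch : pvChunk c = [] := by
            rw [← hstep, if_neg hv]
          simp only [List.foldl_cons, if_neg hg, hof, if_neg hv]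
          have hs0 : s ++ pvChunk c = s := by rw [hch]; simp
          have hih := ih hdcs (s ++ pvChunk c) hs' hpre'
          rw [hs0] at hih
          rw [hih, hfm, hch]
          simp

-- B's classifying pass builds exactly the decimal filter and the letter filterMap
lemma pvBfold (cs : List Char) : ∀ d l : List Char,
    cs.foldl (fun p c =>
      let v : Int := pvHexFind c
      if 0 ≤ v ∧ v ≤ 9 then (p.1 ++ [c], p.2)
      else if 10 ≤ v then (p.1, p.2 ++ [Char.ofNat ('0'.toNat + (v - 10).toNat)])
      else p) (d, l)
    = (d ++ cs.filter (fun c => decide (0 ≤ pvHexFind c ∧ pvHexFind c ≤ 9)),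
       l ++ cs.filterMap pvLet) := by
  induction cs with
  | nil => intro d l; simp
  | cons c cs ih =>
    intro d l
    by_cases h1 : 0 ≤ pvHexFind c ∧ pvHexFind c ≤ 9
    · have hl : pvLet c = none := by unfold pvLet; rw [if_neg (by omega)]
      simp only [List.foldl_cons, if_pos h1, List.filter_cons, List.filterMap_cons, hl,
        decide_eq_true_eq]
      rw [ih (d ++ [c]) l]
      simp
    · by_cases h2 : 10 ≤ pvHexFind c
      · have hl : pvLet c = some (Char.ofNat ('0'.toNat + (pvHexFind c - 10).toNat)) := by
          unfold pvLet; rw [if_pos h2]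
        simp only [List.foldl_cons, if_neg h1, if_pos h2, List.filter_cons,
          List.filterMap_cons, hl, decide_eq_true_eq]
        rw [ih d (l ++ [Char.ofNat ('0'.toNat + (pvHexFind c - 10).toNat)])]
        simp
      · have hl : pvLet c = none := by unfold pvLet; rw [if_neg h2]
        simp only [List.foldl_cons, if_neg h1, if_neg h2, List.filter_cons,
          List.filterMap_cons, hl, decide_eq_true_eq]
        rw [ih d l]

-- ===== VERDICT (by name: the statement is the Claim_ definition above) =====
theorem get_digits_from_string_py_spec : Claim_equal_get_digits_from_string_py := by
  intro ct length hdom hpre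
  unfold Spec_get_digits_from_string_py
  have hdomc : ∀ c ∈ ct.toList, pvDomChar c = true := by
    have h := hdom
    unfold Dom_get_digits_from_string_py pvDomStr at h
    simp only [Bool.and_eq_true, List.all_eq_true] at h
    exact fun c hc => h.1 c hc
  simp only [get_digits_from_string_py, get_digits_from_string_py_alt]
  rw [pvBfold]
  have hDB : ct.toList.filter (fun c => decide (0 ≤ pvHexFind c ∧ pvHexFind c ≤ 9))
      = ct.toList.filter (fun c => PySem.Chars.isdigit c) :=
    List.filter_congr (fun c hc => (pvDec_eq c (hdomc c hc)).symm)
  rw [hDB]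
  simp only [List.nil_append]
  set D := ct.toList.filter (fun c => PySem.Chars.isdigit c) with hD
  set L := ct.toList.filterMap pvLet with hL
  by_cases hl : length ≤ 0
  · have hmax : max length 0 = 0 := by omega
    rw [pvP1_id length ct.toList [] (by simpa using hl), hmax]
    rw [if_neg (by simp only [List.length_nil, Int.natCast_zero]; omega)]
    rw [if_pos (by positivity)]
    rw [PySem.List.slice_to _ (by omega)]
    simp
  · have hmax : max length 0 = length := by omega
    rw [pvP1_eq length ct.toList hdomc [] (by simp; omega), hmax]
    simp only [List.nil_append, List.length_nil, Nat.sub_zero, ← hD]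
    by_cases henough : length ≤ (D.length : Int)
    · have hlen : (D.take length.toNat).length = length.toNat := by
        simp only [List.length_take]; omega
      rw [if_neg (by rw [hlen]; omega)]
      rw [if_pos henough]
      rw [PySem.List.slice_to _ (by omega)]
    · have htakeD : D.take length.toNat = D := List.take_of_length_le (by omega)
      rw [htakeD, if_pos (by omega), if_neg (by omega)]
      -- A raises nowhere here: Pre_'s second disjunct supplies pvP2_eq's hypothesis
      have hP : ∀ i, i < ct.toList.length →
          (PySem.Int.ofCharsBase? [ct.toList[i]!] 16).isSome = true ∨
          length ≤ (D.length : Int) +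
            ((ct.toList.take i).countP (fun c => (pvLet c).isSome) : Int) := by
        intro i hi
        rcases hpre with h | h
        · exact absurd (hD ▸ h) henough
        · rcases h i hi with h | ⟨_, hcnt⟩
          · left
            simp only [Bool.or_eq_true] at h
            rcases h with h | h
            · have hgi : ct.toList[i]! = ct.toList[i] := by
                rw [List.getElem!_eq_getElem?_getD, List.getElem?_eq_getElem hi]
                rfl
              have hmem : ct.toList[i]! ∈ ct.toList := by
                rw [hgi]; exact List.getElem_mem hi
              exact pvDigit_hex _ (hdomc _ hmem) h
            · exact h
          · right
            have hcc : (ct.toList.take i).countP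
                  (fun c => !PySem.Chars.isdigit c && (PySem.Int.ofCharsBase? [c] 16).isSome)
                = (ct.toList.take i).countP (fun c => (pvLet c).isSome) := by
              refine (List.countP_congr fun c hc => ?_).symm
              simp [pvLet_isSome c (hdomc c (List.mem_of_mem_take hc))]
            rw [← hD, hcc] at hcnt
            exact hcnt
      rw [pvP2_eq length ct.toList hdomc D (by omega) hP]
      rw [PySem.List.slice_to _ (by omega), ← hL]
      have hta : (D ++ L).take length.toNat = D ++ L.take (length.toNat - D.length) := by
        rw [List.take_append, List.take_of_length_le (show D.length ≤ length.toNat by omega)]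
      rw [hta]
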